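-- pv_equiv track=rewrite | github.com/rupesh-6/Ai_ChatBot | app.py | is_likely_disease
-- ===== SOURCE A (Python) =====
-- DISEASES = [
--     "malaria", "dengue", "covid", "mononucleosis", "syphilis", "tuberculosis",
--     "hepatitis", "gonorrhea", "chlamydia", "hiv", "aids", "herpes",
--     "influenza", "measles", "mumps", "rubella", "chickenpox", "gastroenteritis",
--     "diarrhea", "flu", "common cold", "pneumonia", "bronchitis", "diabetes",
--     "hypertension", "asthma", "arthritis", "cancer", "alzheimer", "parkinson"
-- ]
--
-- DISEASE_MEDICATIONS = {
--     "dengue": [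
--         {"name": "Paracetamol", "purpose": "Reduce fever and relieve pain",
--          "dosage": "500-1000mg every 4-6 hours as needed, not exceeding 4000mg in 24 hours",
--          "warning": "Avoid NSAIDs like ibuprofen or aspirin as they may increase bleeding risk"},
--         {"name": "Oral Rehydration Solution", "purpose": "Prevent dehydration",
--          "dosage": "Drink regularly throughout the day to maintain hydration",
--          "warning": "Watch for signs of severe dehydration requiring medical attention"},
--         {"name": "Papaya Leaf Extract", "purpose": "May help increase platelet count",
--          "dosage": "As directed on the product or by healthcare provider",
--          "warning": "Considered complementary; consult doctor before use"}
--     ],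
--     "malaria": [
--         {"name": "Chloroquine", "purpose": "Treat specific types of malaria",
--          "dosage": "As prescribed by healthcare provider",
--          "warning": "Take exactly as directed; may cause stomach upset or headache"},
--         {"name": "Artemisinin-based combination therapies (ACTs)",
--          "purpose": "First-line treatment for P. falciparum malaria",
--          "dosage": "Follow precise prescription from healthcare provider",
--          "warning": "Complete full course of medication even when feeling better"}
--     ],
--     "mononucleosis": [
--         {"name": "Acetaminophen", "purpose": "Reduce fever and relieve pain",
--          "dosage": "As directed on package or by healthcare provider",
--          "warning": "Do not exceed recommended dosage; can cause liver damage"},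
--         {"name": "Ibuprofen", "purpose": "Reduce inflammation and pain",
--          "dosage": "As directed on package or by healthcare provider",
--          "warning": "Take with food; can cause stomach irritation"}
--     ],
--     "covid": [
--         {"name": "Paracetamol", "purpose": "Reduce fever and relieve pain",
--          "dosage": "500-1000mg every 4-6 hours as needed, not exceeding 4000mg in 24 hours",
--          "warning": "Not a treatment for COVID-19, only for symptom relief"},
--         {"name": "Vitamin C", "purpose": "Support immune function",
--          "dosage": "500-1000mg daily or as directed by healthcare provider",
--          "warning": "High doses may cause digestive issues in some people"},
--         {"name": "Vitamin D", "purpose": "Support immune function",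
--          "dosage": "1000-4000 IU daily or as directed by healthcare provider",
--          "warning": "Very high doses may lead to toxicity; follow recommendations"}
--     ],
--     "syphilis": [
--         {"name": "Penicillin G", "purpose": "Primary antibiotic for treatment of syphilis",
--          "dosage": "As prescribed by healthcare provider, typically administered as injections",
--          "warning": "May cause allergic reactions; inform your doctor if you have penicillin allergy"},
--         {"name": "Doxycycline", "purpose": "Alternative for patients allergic to penicillin",
--          "dosage": "100 mg twice daily for 14 days (for secondary syphilis)",
--          "warning": "Avoid sun exposure; do not take with dairy products; not suitable for pregnant women"}
--     ]
-- }
--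
-- def is_likely_disease(text):
--     """Check if the input text likely refers to a disease rather than a medication"""
--     text_lower = text.lower()
--
--     # Check against our known disease list
--     for disease in DISEASES:
--         if disease in text_lower:
--             return True
--
--     # Check for disease keywords
--     disease_keywords = ["disease", "infection", "condition", "syndrome", "virus", "bacterial", "fungal",
--                      "itis", "osis", "emia", "pathy", "fever", "disorder", "cancer"]
--
--     # Check for keywords
--     for keyword in disease_keywords:
--         if keyword in text_lower:
--             return True
--
--     # Check for disease suffix patterns (like -itis for inflammation)
--     disease_suffixes = ["itis", "osis", "emia", "pathy", "algia", "oma"]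
--     for suffix in disease_suffixes:
--         if text_lower.endswith(suffix):
--             return True
--
--     # Check in our disease medications dictionary
--     for disease in DISEASE_MEDICATIONS.keys():
--         if disease in text_lower:
--             return True
--
--     return False
-- ===== SOURCE B (Python) =====
-- DISEASES = [
--     "malaria", "dengue", "covid", "mononucleosis", "syphilis", "tuberculosis",
--     "hepatitis", "gonorrhea", "chlamydia", "hiv", "aids", "herpes",
--     "influenza", "measles", "mumps", "rubella", "chickenpox", "gastroenteritis",
--     "diarrhea", "flu", "common cold", "pneumonia", "bronchitis", "diabetes",
--     "hypertension", "asthma", "arthritis", "cancer", "alzheimer", "parkinson"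
-- ]
--
-- _KEYWORDS = ["disease", "infection", "condition", "syndrome", "virus", "bacterial",
--              "fungal", "itis", "osis", "emia", "pathy", "fever", "disorder"]
--
-- # "cancer" (keyword) and the DISEASE_MEDICATIONS keys are already in DISEASES, and
-- # the suffixes "itis"/"osis"/"emia"/"pathy" are subsumed by the substring keywords;
-- # only "algia"/"oma" remain genuinely end-anchored (suffix_only = True).
-- _PATTERNS = [(p, False) for p in DISEASES + _KEYWORDS] + [(p, True) for p in ("algia", "oma")]
--
-- # Index every pattern under its first character, so the scan below only ever
-- # compares patterns that can possibly start at the current position.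
-- _KEYED = [(p[0], (p, suffix_only)) for (p, suffix_only) in _PATTERNS]
-- _INDEX = {}
-- for c, pair in _KEYED:
--     _INDEX[c] = _INDEX.get(c, []) + [pair]
--
-- def is_likely_disease(text):
--     """Check if the input text likely refers to a disease rather than a medication"""
--     t = text.lower()
--     n = len(t)
--     for i, c in enumerate(t):
--         for p, suffix_only in _INDEX.get(c, []):
--             if t.startswith(p, i) and (not suffix_only or i + len(p) == n):
--                 return True
--     return False
-- ===== Notes on version B (the rewrite author's own statement) =====
-- stated objective: alternative
-- what changed: Replaced A's four pattern-driven membership loops (diseases, keywords, endswith suffixes, dict keys) by a single left-to-right scan over the positions of the lowercased text that, at each position, consults a precomputed index mapping a first character to the patterns that can start there (the two genuinely end-anchored suffixes carry a suffix_only flag checked against the position); the keyword duplicated in the disease list, the dict keys and four of the six suffixes are dropped as provably subsumed.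
import Mathlib
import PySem

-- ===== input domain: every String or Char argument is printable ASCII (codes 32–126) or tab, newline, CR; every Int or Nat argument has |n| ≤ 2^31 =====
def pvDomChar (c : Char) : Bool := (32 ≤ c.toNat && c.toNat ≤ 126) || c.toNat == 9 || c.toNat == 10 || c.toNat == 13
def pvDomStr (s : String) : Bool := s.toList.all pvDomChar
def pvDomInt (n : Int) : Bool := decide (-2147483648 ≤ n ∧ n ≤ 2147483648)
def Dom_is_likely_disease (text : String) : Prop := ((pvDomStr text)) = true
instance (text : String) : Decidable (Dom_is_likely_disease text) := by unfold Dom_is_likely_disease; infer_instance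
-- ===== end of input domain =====

-- B replaces A's four pattern-driven membership loops by one left-to-right scan of the
-- lowercased text with a precomputed first-character index of the patterns (objective: alternative).

-- ===== PORT A =====
def pvDiseases : List String :=
  ["malaria", "dengue", "covid", "mononucleosis", "syphilis", "tuberculosis",
   "hepatitis", "gonorrhea", "chlamydia", "hiv", "aids", "herpes",
   "influenza", "measles", "mumps", "rubella", "chickenpox", "gastroenteritis",
   "diarrhea", "flu", "common cold", "pneumonia", "bronchitis", "diabetes",
   "hypertension", "asthma", "arthritis", "cancer", "alzheimer", "parkinson"]

def pvKeywordsA : List String :=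
  ["disease", "infection", "condition", "syndrome", "virus", "bacterial", "fungal",
   "itis", "osis", "emia", "pathy", "fever", "disorder", "cancer"]

def pvSuffixesA : List String := ["itis", "osis", "emia", "pathy", "algia", "oma"]

-- keys of DISEASE_MEDICATIONS in insertion order
def pvDictKeysA : List String := ["dengue", "malaria", "mononucleosis", "covid", "syphilis"]

def is_likely_disease (text : String) : Bool :=
  let text_lower := PySem.Str.lower text
  if pvDiseases.any (fun disease => PySem.Str.isIn disease text_lower) then true
  else if pvKeywordsA.any (fun keyword => PySem.Str.isIn keyword text_lower) then true
  else if pvSuffixesA.any (fun suffix => PySem.Str.endswith text_lower suffix) then true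
  else if pvDictKeysA.any (fun disease => PySem.Str.isIn disease text_lower) then true
  else false

-- ===== PORT B =====
def pvKeywordsB : List String :=
  ["disease", "infection", "condition", "syndrome", "virus", "bacterial",
   "fungal", "itis", "osis", "emia", "pathy", "fever", "disorder"]

-- _PATTERNS = [(p, False) for p in DISEASES + _KEYWORDS] + [(p, True) for p in ("algia", "oma")]
def pvPatterns : List (String × Bool) :=
  (pvDiseases ++ pvKeywordsB).map (fun p => (p, false))
    ++ (["algia", "oma"] : List String).map (fun p => (p, true))

-- p[0] (every pattern is a nonempty string, so the default is never used)
def pvKey (q : String × Bool) : Char := q.1.toList.headD ' '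

-- _KEYED = [(p[0], (p, suffix_only)) for (p, suffix_only) in _PATTERNS]
def pvKeyed : List (Char × (String × Bool)) := pvPatterns.map (fun q => (pvKey q, q))

-- _INDEX built by the loop: _INDEX[c] = _INDEX.get(c, []) + [pair]
def pvIndex : PySem.Dict Char (List (String × Bool)) :=
  pvKeyed.foldl (fun d e => d.modify e.1 [] (fun l => l ++ [e.2])) PySem.Dict.empty

def is_likely_disease_alt (text : String) : Bool :=
  let t := PySem.Str.lower text
  let cs := t.toList
  let n := cs.length
  (PySem.List.enumerate cs).any (fun e =>
    (pvIndex.getD e.2 []).any (fun q =>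
      -- t.startswith(p, i) with 0 ≤ i: exactly "p is a prefix of t[i:]"
      (q.1.toList.isPrefixOf (cs.drop e.1.toNat))
        && (!q.2 || e.1 + (q.1.toList.length : Int) == (n : Int))))

-- ===== PRECONDITION & SPEC =====
def Spec_is_likely_disease (text : String) (out : Bool) : Prop := out = is_likely_disease_alt text
instance (text : String) (out : Bool) : Decidable (Spec_is_likely_disease text out) := by unfold Spec_is_likely_disease; infer_instance

-- ===== CLAIM (what is proved, stated in full; the proofs are below) =====
def Claim_equal_is_likely_disease : Prop := ∀ (text : String), Dom_is_likely_disease text → Spec_is_likely_disease text (is_likely_disease text)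

-- ===== LEMMAS AND PROOFS =====

-- Both programs are proved equal to the same middle form:
--   "some pattern of pvDiseases ++ pvKeywordsB occurs in t, or t ends with algia/oma".

-- a suffix of t is also a substring of t
theorem pv_endswith_imp_isIn (t s : String) (h : PySem.Str.endswith t s = true) :
    PySem.Str.isIn s t = true := by
  simp only [PySem.Str.endswith_eq] at h
  simp only [PySem.Str.isIn_eq]
  exact (PySem.Chars.isIn_iff_infix _ _).mpr ((PySem.Chars.endswith_iff _ _).mp h).isInfix

-- any member's match forces the fold to true
theorem pv_any_of_mem {α : Type} {l : List α} {f : α → Bool} {x : α}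
    (hx : x ∈ l) (h : f x = true) : l.any f = true :=
  List.any_eq_true.mpr ⟨x, hx, h⟩

-- the pure boolean skeleton of "A = middle form"
theorem pv_bool_core (D KB c E1 E2 E3 E4 ea eo M1 M2 M3 M4 M5 : Bool)
    (hc : c = true → D = true)
    (h1 : E1 = true → KB = true) (h2 : E2 = true → KB = true)
    (h3 : E3 = true → KB = true) (h4 : E4 = true → KB = true)
    (hm1 : M1 = true → D = true) (hm2 : M2 = true → D = true)
    (hm3 : M3 = true → D = true) (hm4 : M4 = true → D = true)
    (hm5 : M5 = true → D = true) :
    (if D then true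
     else if (KB || c) then true
     else if (E1 || (E2 || (E3 || (E4 || (ea || eo))))) then true
     else if (M1 || (M2 || (M3 || (M4 || M5)))) then true
     else false)
      = ((D || KB) || (ea || eo)) := by
  cases D <;> cases KB <;> cases ea <;> cases eo <;> simp_all

set_option maxHeartbeats 1000000 in
theorem pv_A_eq_mid (text : String) :
    is_likely_disease text =
      ((pvDiseases ++ pvKeywordsB).any
          (fun p => PySem.Str.isIn p (PySem.Str.lower text))
        || (PySem.Str.endswith (PySem.Str.lower text) "algia"
             || PySem.Str.endswith (PySem.Str.lower text) "oma")) := by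
  unfold is_likely_disease
  set t := PySem.Str.lower text with ht
  have hK : pvKeywordsA = pvKeywordsB ++ ["cancer"] := by decide
  simp only [hK, pvSuffixesA, pvDictKeysA, List.any_append, List.any_cons,
    List.any_nil, Bool.or_false]
  exact pv_bool_core _ _ _ _ _ _ _ _ _ _ _ _ _ _
    (fun h => pv_any_of_mem (by decide : "cancer" ∈ pvDiseases) h)
    (fun h => pv_any_of_mem (by decide : "itis" ∈ pvKeywordsB) (pv_endswith_imp_isIn t _ h))
    (fun h => pv_any_of_mem (by decide : "osis" ∈ pvKeywordsB) (pv_endswith_imp_isIn t _ h))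
    (fun h => pv_any_of_mem (by decide : "emia" ∈ pvKeywordsB) (pv_endswith_imp_isIn t _ h))
    (fun h => pv_any_of_mem (by decide : "pathy" ∈ pvKeywordsB) (pv_endswith_imp_isIn t _ h))
    (fun h => pv_any_of_mem (by decide : "dengue" ∈ pvDiseases) h)
    (fun h => pv_any_of_mem (by decide : "malaria" ∈ pvDiseases) h)
    (fun h => pv_any_of_mem (by decide : "mononucleosis" ∈ pvDiseases) h)
    (fun h => pv_any_of_mem (by decide : "covid" ∈ pvDiseases) h)
    (fun h => pv_any_of_mem (by decide : "syphilis" ∈ pvDiseases) h)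

-- the index bucket of c holds exactly the patterns whose first character is c
theorem pv_index_getD (c : Char) :
    pvIndex.getD c [] = pvPatterns.filter (fun q => pvKey q == c) := by
  unfold pvIndex pvKeyed
  rw [PySem.Dict.getD_foldl_modify_append]
  simp [PySem.Dict.getD_empty, List.filter_map, Function.comp_def]

theorem pv_mem_bucket {q : String × Bool} {c : Char} :
    q ∈ pvIndex.getD c [] ↔ q ∈ pvPatterns ∧ pvKey q = c := by
  rw [pv_index_getD]
  simp [List.mem_filter]

theorem pv_patterns_ne_nil : ∀ q ∈ pvPatterns, q.1.toList ≠ [] := by decide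

-- a nonempty prefix of cs.drop j pins j below the length and pins cs[j]
theorem pv_hit {cs p : List Char} {j : Nat} (hne : p ≠ []) (hpre : p <+: cs.drop j) :
    ∃ h : j < cs.length, p.headD ' ' = cs[j] := by
  cases p with
  | nil => exact absurd rfl hne
  | cons a p' =>
    obtain ⟨tl, htl⟩ := hpre
    have hdrop : cs.drop j = a :: (p' ++ tl) := by simpa using htl.symm
    have hlen : cs.length - j = (a :: (p' ++ tl)).length := by
      rw [← hdrop]; simp
    have hj : j < cs.length := by simp at hlen; omega
    refine ⟨hj, ?_⟩
    have h : (cs.drop j)[0]? = cs[j+0]? := List.getElem?_drop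
    rw [hdrop] at h
    have h0 : cs[j]? = some a := by simpa using h.symm
    have := List.getElem?_eq_getElem hj
    rw [this] at h0
    simp_all

set_option maxHeartbeats 1000000 in
theorem pv_B_eq_mid (text : String) :
    is_likely_disease_alt text =
      ((pvDiseases ++ pvKeywordsB).any
          (fun p => PySem.Str.isIn p (PySem.Str.lower text))
        || (PySem.Str.endswith (PySem.Str.lower text) "algia"
             || PySem.Str.endswith (PySem.Str.lower text) "oma")) := by
  unfold is_likely_disease_alt
  set t := PySem.Str.lower text with ht
  set cs := t.toList with hcs
  rw [Bool.eq_iff_iff]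
  simp only [List.any_eq_true, Bool.or_eq_true, Bool.and_eq_true, PySem.Str.isIn_eq,
    PySem.Str.endswith_eq, PySem.List.mem_enumerate_iff, ← hcs]
  constructor
  · rintro ⟨e, ⟨k, hk, hek⟩, q, hqmem, hpre, hcond⟩
    subst hek
    simp only at hpre hcond
    rw [pv_mem_bucket] at hqmem
    obtain ⟨hqP, hqkey⟩ := hqmem
    have hknat : ((0 : Int) + (k : Int)).toNat = k := by omega
    rw [hknat] at hpre
    have hpre' : q.1.toList <+: cs.drop k := List.isPrefixOf_iff_prefix.mp hpre
    unfold pvPatterns at hqP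
    rcases List.mem_append.mp hqP with hmem | hmem
    · obtain ⟨p, hpmem, hpq⟩ := List.mem_map.mp hmem
      refine Or.inl ⟨p, hpmem, ?_⟩
      exact (PySem.Chars.exists_prefix_drop_iff_isIn p.toList cs).mp
        ⟨k, by rw [← hpq] at hpre'; exact hpre'⟩
    · -- suffix-only pattern: matched at the very end
      obtain ⟨p, hpmem, hpq⟩ := List.mem_map.mp hmem
      have hq1 : q.1 = p := by rw [← hpq]
      have hq2 : q.2 = true := by rw [← hpq]
      rcases hcond with hbad | hcnd
      · rw [hq2] at hbad; simp at hbad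
      · have hInt : (0 : Int) + k + q.1.toList.length = (cs.length : Int) :=
          beq_iff_eq.mp hcnd
        have hlen : k + q.1.toList.length = cs.length := by omega
        have heq : q.1.toList = cs.drop k := hpre'.eq_of_length (by simp only [List.length_drop]; omega)
        have hsuf : q.1.toList <:+ cs := heq ▸ List.drop_suffix k cs
        refine Or.inr ?_
        rcases List.mem_cons.mp hpmem with h | h
        · exact Or.inl ((PySem.Chars.endswith_iff _ _).mpr
            (by rw [hq1, h] at hsuf; exact hsuf))
        · have hpo : p = "oma" := by simpa using h
          exact Or.inr ((PySem.Chars.endswith_iff _ _).mpr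
            (by rw [hq1, hpo] at hsuf; exact hsuf))
  · -- middle form ⇒ the scan finds a hit
    intro h
    have hwit : ∃ (q : String × Bool) (j : Nat),
        q ∈ pvPatterns ∧ q.1.toList <+: cs.drop j ∧
        (q.2 = true → j + q.1.toList.length = cs.length) := by
      rcases h with ⟨p, hpmem, hin⟩ | hsuf | hsuf
      · obtain ⟨j, hj⟩ := (PySem.Chars.exists_prefix_drop_iff_isIn p.toList cs).mpr hin
        refine ⟨(p, false), j, ?_, hj, by simp⟩
        unfold pvPatterns
        exact List.mem_append.mpr (Or.inl (List.mem_map.mpr ⟨p, hpmem, rfl⟩))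
      · obtain ⟨pre, hpre⟩ := (PySem.Chars.endswith_iff _ _).mp hsuf
        refine ⟨("algia", true), pre.length, by decide, ?_, fun _ => ?_⟩
        · rw [← hpre]; simp
        · rw [← hpre]; simp
      · obtain ⟨pre, hpre⟩ := (PySem.Chars.endswith_iff _ _).mp hsuf
        refine ⟨("oma", true), pre.length, by decide, ?_, fun _ => ?_⟩
        · rw [← hpre]; simp
        · rw [← hpre]; simp
    obtain ⟨q, j, hqP, hpre, hcond⟩ := hwit
    obtain ⟨hj, hkey⟩ := pv_hit (pv_patterns_ne_nil q hqP) hpre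
    refine ⟨((0 : Int) + (j : Int), cs[j]), ⟨j, hj, rfl⟩, q,
      pv_mem_bucket.mpr ⟨hqP, hkey⟩, ?_, ?_⟩
    · have hn : ((0 : Int) + (j : Int)).toNat = j := by omega
      simp only [hn]
      exact List.isPrefixOf_iff_prefix.mpr hpre
    · cases hq2 : q.2 with
      | false => exact Or.inl (by simp)
      | true =>
        refine Or.inr ?_
        rw [beq_iff_eq]
        have := hcond hq2
        push_cast
        omega

-- ===== VERDICT (by name: the statement is the Claim_ definition above) =====
theorem is_likely_disease_spec : Claim_equal_is_likely_disease := by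
  intro text _
  unfold Spec_is_likely_disease
  rw [pv_A_eq_mid, pv_B_eq_mid]
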